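-- pv_equiv track=rewrite | github.com/saxenauts/persona | examples/conversation.py | split_conversation
-- ===== SOURCE A (Python) =====
-- def split_conversation(text):
--     """Split conversation into user-assistant pairs"""
--     # Split on 'user:' and 'A:' markers
--     parts = []
--     current = []
--
--     for line in text.split('\n'):
--         if line.startswith('user:') or line.startswith('A:'):
--             if current:
--                 parts.append('\n'.join(current))
--             current = [line]
--         elif line.strip():
--             current.append(line)
--
--     if current:
--         parts.append('\n'.join(current))
--
--     # Group into pairs (user + assistant)
--     pairs = []
--     for i in range(0, len(parts), 2):
--         if i + 1 < len(parts):
--             pairs.append(parts[i] + '\n' + parts[i+1])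
--
--     return pairs
-- ===== SOURCE B (Python) =====
-- def _is_marker(line):
--     return line.startswith('user:') or line.startswith('A:')
--
--
-- def _segments(lines):
--     """Chunk-scan: slice the line list at marker boundaries, then
--     blank-filter and join each chunk, skipping chunks that end up empty."""
--     segs = []
--     i = 0
--     n = len(lines)
--     while i < n:
--         j = i + 1
--         while j < n and not _is_marker(lines[j]):
--             j += 1
--         kept = [x for x in lines[i:j] if x.strip()]
--         if kept:
--             segs.append('\n'.join(kept))
--         i = j
--     return segs
--
--
-- def split_conversation(text):
--     """Split conversation into user-assistant pairs"""
--     segs = _segments(text.split('\n'))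
--     return [a + '\n' + b for a, b in zip(segs[0::2], segs[1::2])]
-- ===== Notes on version B (the rewrite author's own statement) =====
-- stated objective: alternative
-- what changed: A's single-pass accumulator state machine (parts/current rebuilt line by line, then an index loop over range(0,len,2)) is replaced by a two-phase chunk scan that slices the line list at marker boundaries, blank-filters and joins each chunk, and pairs segments by zipping the even/odd strided slices.
import Mathlib
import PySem

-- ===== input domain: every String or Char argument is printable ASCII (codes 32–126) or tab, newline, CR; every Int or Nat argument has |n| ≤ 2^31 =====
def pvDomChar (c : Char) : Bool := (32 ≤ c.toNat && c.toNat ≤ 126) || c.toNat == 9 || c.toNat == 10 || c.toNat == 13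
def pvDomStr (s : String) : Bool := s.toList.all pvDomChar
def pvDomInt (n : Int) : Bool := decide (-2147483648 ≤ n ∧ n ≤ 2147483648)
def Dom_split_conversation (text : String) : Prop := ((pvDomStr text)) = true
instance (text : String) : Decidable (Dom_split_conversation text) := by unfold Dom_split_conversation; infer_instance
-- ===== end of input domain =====

-- B replaces A's line-at-a-time accumulator state machine by a two-phase chunk scan
-- (slice the line list at marker boundaries, blank-filter and join each chunk) and
-- pairs segments by zipping the even/odd strided slices instead of an index loop:
-- an alternative decomposition with the same cost.


-- ===== PORT A =====
-- one loop step of A's accumulator state machine; state = (parts, current)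
def pvStepA (st : List String × List String) (line : String) : List String × List String :=
  if PySem.Str.startswith line "user:" || PySem.Str.startswith line "A:" then
    (if st.2 ≠ [] then st.1 ++ [PySem.Str.join "\n" st.2] else st.1, [line])
  else if PySem.Str.strip line != "" then (st.1, st.2 ++ [line])
  else st

def split_conversation (text : String) : List String :=
  -- text.split('\n'): the separator is the nonempty literal "\n", so split? is always some
  let lines := (PySem.Str.split? text "\n").getD []
  let st := lines.foldl pvStepA ([], [])
  let parts := if st.2 ≠ [] then st.1 ++ [PySem.Str.join "\n" st.2] else st.1
  (PySem.List.pyRange 0 (parts.length : Int) 2).foldl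
    (fun pairs i =>
      if i + 1 < (parts.length : Int) then
        pairs ++ [PySem.List.pyGetD parts i "" ++ "\n" ++ PySem.List.pyGetD parts (i + 1) ""]
      else pairs) []

-- ===== PORT B =====
def pvIsMarker (line : String) : Bool :=
  PySem.Str.startswith line "user:" || PySem.Str.startswith line "A:"

-- Source B's _segments: the outer while consumes one chunk per iteration (lines[i:j] = the
-- first remaining line plus the following run of non-marker lines); ported as recursion
-- on the remaining suffix, the inner index scan j expressed as takeWhile/dropWhile
-- (exact: lines[i:j] is l :: takeWhile, lines[j:] is dropWhile).
def pvSegments : List String → List String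
  | [] => []
  | l :: ls =>
    let kept := (l :: ls.takeWhile (fun x => !pvIsMarker x)).filter
      (fun x => PySem.Str.strip x != "")
    (if kept = [] then [] else [PySem.Str.join "\n" kept]) ++
      pvSegments (ls.dropWhile (fun x => !pvIsMarker x))
termination_by ls => ls.length
decreasing_by simpa using Nat.lt_succ_of_le (List.length_dropWhile_le _ _)

-- segs[0::2] and segs[1::2], ported by hand (PySem.List.slice has no step argument)
def pvEvens : List String → List String
  | [] => []
  | [a] => [a]
  | a :: _ :: r => a :: pvEvens r

def pvOdds : List String → List String
  | [] => []
  | [_] => []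
  | _ :: b :: r => b :: pvOdds r

def split_conversation_alt (text : String) : List String :=
  let segs := pvSegments ((PySem.Str.split? text "\n").getD [])
  ((pvEvens segs).zip (pvOdds segs)).map (fun p => p.1 ++ "\n" ++ p.2)

-- ===== PRECONDITION & SPEC =====
def Spec_split_conversation (text : String) (out : List String) : Prop := out = split_conversation_alt text
instance (text : String) (out : List String) : Decidable (Spec_split_conversation text out) := by unfold Spec_split_conversation; infer_instance

-- ===== CLAIM (what is proved, stated in full; the proofs are below) =====
def Claim_equal_split_conversation : Prop := ∀ (text : String), Dom_split_conversation text → Spec_split_conversation text (split_conversation text)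

-- ===== LEMMAS AND PROOFS =====

-- A's final flush of `current` into `parts`
def pvFin (st : List String × List String) : List String :=
  if st.2 ≠ [] then st.1 ++ [PySem.Str.join "\n" st.2] else st.1

-- recursive characterisation of A's grouping loop, parametrised by the pending chunk c
def pvSegsA (c : List String) : List String → List String
  | [] => if c = [] then [] else [PySem.Str.join "\n" c]
  | l :: ls =>
    if pvIsMarker l then
      (if c = [] then [] else [PySem.Str.join "\n" c]) ++ pvSegsA [l] ls
    else if PySem.Str.strip l != "" then pvSegsA (c ++ [l]) ls
    else pvSegsA c ls

-- what remains once the scan sits at a chunk boundary (empty, or a marker line)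
def pvTail : List String → List String
  | [] => []
  | m :: r => pvSegsA [m] r

-- recursive form of both A's pairing loop and B's zip of strided slices
def pvPairsRec : List String → List String
  | a :: b :: r => (a ++ "\n" ++ b) :: pvPairsRec r
  | _ => []

theorem pvSegsA_cons' (c : List String) (l : String) (ls : List String) :
    pvSegsA c (l :: ls) =
      if pvIsMarker l then
        (if c = [] then [] else [PySem.Str.join "\n" c]) ++ pvSegsA [l] ls
      else if PySem.Str.strip l != "" then pvSegsA (c ++ [l]) ls
      else pvSegsA c ls := rfl

theorem pvSegments_cons (l : String) (ls : List String) :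
    pvSegments (l :: ls) =
      (if (l :: ls.takeWhile (fun x => !pvIsMarker x)).filter
            (fun x => PySem.Str.strip x != "") = [] then []
       else [PySem.Str.join "\n" ((l :: ls.takeWhile (fun x => !pvIsMarker x)).filter
            (fun x => PySem.Str.strip x != ""))]) ++
        pvSegments (ls.dropWhile (fun x => !pvIsMarker x)) := by
  rw [pvSegments]

theorem pvSegments_nil : pvSegments [] = [] := by rw [pvSegments]

theorem pvFoldA_eq_segsA (ls : List String) : ∀ (parts c : List String),
    pvFin (ls.foldl pvStepA (parts, c)) = parts ++ pvSegsA c ls := by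
  induction ls with
  | nil =>
    intro parts c
    by_cases hc : c = [] <;> simp [pvFin, pvSegsA, hc]
  | cons l ls ih =>
    intro parts c
    simp only [List.foldl_cons]
    by_cases hm : (PySem.Str.startswith l "user:" || PySem.Str.startswith l "A:") = true
    · by_cases hc : c = [] <;>
        simp [pvStepA, hm, hc, pvSegsA, pvIsMarker, ih, -PySem.Str.startswith_eq]
    · by_cases hb : (PySem.Str.strip l != "") = true
      · simp [pvStepA, hm, hb, pvSegsA, pvIsMarker, ih, -PySem.Str.startswith_eq]
      · simp [pvStepA, hm, hb, pvSegsA, pvIsMarker, ih, -PySem.Str.startswith_eq]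

theorem pvSegsA_chunk (ls : List String) : ∀ (c : List String),
    pvSegsA c ls =
      (if c ++ (ls.takeWhile (fun x => !pvIsMarker x)).filter
            (fun x => PySem.Str.strip x != "") = [] then []
       else [PySem.Str.join "\n" (c ++ (ls.takeWhile (fun x => !pvIsMarker x)).filter
            (fun x => PySem.Str.strip x != ""))]) ++
        pvTail (ls.dropWhile (fun x => !pvIsMarker x)) := by
  induction ls with
  | nil => intro c; by_cases hc : c = [] <;> simp [pvSegsA, pvTail, hc]
  | cons l ls ih =>
    intro c
    by_cases hm : pvIsMarker l = true
    · rw [pvSegsA_cons', if_pos hm, List.takeWhile_cons_of_neg (by simp [hm]),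
        List.dropWhile_cons_of_neg (by simp [hm])]
      simp [pvTail]
    · have hm' : pvIsMarker l = false := by simpa using hm
      rw [pvSegsA_cons', if_neg (by simp [hm']), List.takeWhile_cons_of_pos (by simp [hm']),
        List.dropWhile_cons_of_pos (by simp [hm'])]
      by_cases hb : (PySem.Str.strip l != "") = true
      · rw [if_pos hb, ih (c ++ [l])]
        simp [hb, List.append_assoc]
      · rw [if_neg hb, ih c]
        simp [hb]

theorem pvMem_dropWhile {p : Char → Bool} {c : Char} :
    ∀ {l : List Char}, c ∈ l → p c = false → c ∈ l.dropWhile p := by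
  intro l
  induction l with
  | nil => intro h; simp at h
  | cons a l ih =>
    intro h hc
    by_cases ha : p a = true
    · have : c ∈ l := by
        rcases List.mem_cons.1 h with h1 | h1
        · subst h1; rw [ha] at hc; cases hc
        · exact h1
      simpa [List.dropWhile_cons, ha] using ih this hc
    · simpa [List.dropWhile_cons, ha] using h

theorem pvMarker_nonblank {l : String} (h : pvIsMarker l = true) :
    (PySem.Str.strip l != "") = true := by
  have hmem : ∃ c ∈ l.toList, PySem.Chars.isspace c = false := by
    rcases Bool.or_eq_true_iff.1 (by simpa [pvIsMarker] using h) with h1 | h1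
    · have hp : "user:".toList <+: l.toList :=
        (PySem.Chars.startswith_iff _ _).1 (by simpa using h1)
      rcases hp with ⟨t, ht⟩
      exact ⟨'u', by rw [← ht]; simp, by decide⟩
    · have hp : "A:".toList <+: l.toList :=
        (PySem.Chars.startswith_iff _ _).1 (by simpa using h1)
      rcases hp with ⟨t, ht⟩
      exact ⟨'A', by rw [← ht]; simp, by decide⟩
  rcases hmem with ⟨c, hc, hcs⟩
  have h1 : c ∈ PySem.Chars.lstrip l.toList := pvMem_dropWhile hc hcs
  have h2 : c ∈ PySem.Chars.strip l.toList := by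
    unfold PySem.Chars.strip PySem.Chars.rstrip
    exact List.mem_reverse.2 (pvMem_dropWhile (List.mem_reverse.2 h1) hcs)
  have hne : PySem.Str.strip l ≠ "" := by
    intro hcon
    have h3 : (PySem.Str.strip l).toList = [] := by rw [hcon]; rfl
    rw [PySem.Str.toList_strip] at h3
    rw [h3] at h2
    simp at h2
  simpa [bne_iff_ne] using hne

theorem pvHead_dropWhile_marker {ls : List String} {m : String} {r : List String}
    (h : ls.dropWhile (fun x => !pvIsMarker x) = m :: r) : pvIsMarker m = true := by
  have hne : ls.dropWhile (fun x => !pvIsMarker x) ≠ [] := by rw [h]; simp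
  have h2 := List.head_dropWhile_not (fun x => !pvIsMarker x) hne
  simp only [h, List.head_cons] at h2
  simpa using h2

theorem pvSegsA_eq_segments : ∀ (n : Nat) (ls : List String), ls.length ≤ n →
    pvSegsA [] ls = pvSegments ls := by
  intro n
  induction n with
  | zero =>
    intro ls hl
    have h0 : ls = [] := List.length_eq_zero_iff.1 (Nat.le_zero.1 hl)
    subst h0
    rw [pvSegments_nil]
    rfl
  | succ n ih =>
    intro ls hl
    match ls with
    | [] => rw [pvSegments_nil]; rfl
    | l :: ls =>
      have hlen : ls.length ≤ n := by simpa using hl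
      have htail : pvTail (ls.dropWhile (fun x => !pvIsMarker x)) =
          pvSegments (ls.dropWhile (fun x => !pvIsMarker x)) := by
        have hr : (ls.dropWhile (fun x => !pvIsMarker x)).length ≤ n :=
          le_trans (List.length_dropWhile_le _ _) hlen
        cases hrec : ls.dropWhile (fun x => !pvIsMarker x) with
        | nil => rw [pvSegments_nil]; rfl
        | cons m r =>
          have hm := pvHead_dropWhile_marker hrec
          rw [← ih (m :: r) (hrec ▸ hr)]
          rw [pvSegsA_cons', if_pos hm]
          simp [pvTail]
      by_cases hm : pvIsMarker l = true
      · rw [pvSegsA_cons', if_pos hm, pvSegsA_chunk ls [l], pvSegments_cons, htail]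
        have hb := pvMarker_nonblank hm
        simp [hb]
      · have hm' : pvIsMarker l = false := by simpa using hm
        rw [pvSegsA_chunk (l :: ls) [], pvSegments_cons,
          List.takeWhile_cons_of_pos (by simp [hm']), List.dropWhile_cons_of_pos (by simp [hm']),
          htail]
        simp

-- pairing lemmas
theorem pvZip_eq_pairsRec : ∀ (p : List String),
    ((pvEvens p).zip (pvOdds p)).map (fun q => q.1 ++ "\n" ++ q.2) = pvPairsRec p
  | [] => rfl
  | [a] => rfl
  | a :: b :: r => by
    simp only [pvEvens, pvOdds, List.zip_cons_cons, List.map_cons, pvPairsRec]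
    rw [pvZip_eq_pairsRec r]

theorem pvPyRange_two_cons (a b : Int) (h : a < b) :
    PySem.List.pyRange a b 2 = a :: PySem.List.pyRange (a + 2) b 2 := by
  rw [PySem.List.pyRange_of_pos a b (by norm_num),
    PySem.List.pyRange_of_pos (a + 2) b (by norm_num), if_pos h]
  by_cases h2 : a + 2 < b
  · rw [if_pos h2]
    have hc : ((b - a + 2 - 1) / 2).toNat = ((b - (a + 2) + 2 - 1) / 2).toNat + 1 := by omega
    rw [hc, List.range_succ_eq_map, List.map_cons, List.map_map]
    refine congrArg₂ _ (by norm_num) (List.map_congr_left ?_)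
    intro k _
    simp [Function.comp]
    ring
  · rw [if_neg h2]
    have hc : ((b - a + 2 - 1) / 2).toNat = 1 := by omega
    rw [hc]
    simp [List.range_succ]

theorem pvFoldPairs_gen : ∀ (p s : List String) (acc : List String),
    (PySem.List.pyRange (s.length : Int) (((s ++ p).length : Nat) : Int) 2).foldl
      (fun pairs i =>
        if i + 1 < (((s ++ p).length : Nat) : Int) then
          pairs ++ [PySem.List.pyGetD (s ++ p) i "" ++ "\n" ++
            PySem.List.pyGetD (s ++ p) (i + 1) ""]
        else pairs) acc = acc ++ pvPairsRec p
  | [], s, acc => by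
    rw [List.append_nil, PySem.List.pyRange_of_pos _ _ (by norm_num), if_neg (by omega)]
    simp [pvPairsRec]
  | [a], s, acc => by
    have hlen : (((s ++ [a]).length : Nat) : Int) = (s.length : Int) + 1 := by
      simp
    rw [hlen, pvPyRange_two_cons _ _ (by omega),
      PySem.List.pyRange_of_pos _ _ (by norm_num), if_neg (by omega)]
    simp only [List.foldl_cons]
    rw [if_neg (by omega)]
    simp [pvPairsRec]
  | a :: b :: r, s, acc => by
    have hlen : (((s ++ a :: b :: r).length : Nat) : Int) = (s.length : Int) + (r.length : Int) + 2 := by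
      simp; ring
    rw [hlen, pvPyRange_two_cons _ _ (by omega)]
    simp only [List.foldl_cons]
    rw [if_pos (by omega)]
    have hga : PySem.List.pyGetD (s ++ a :: b :: r) (s.length : Int) "" = a := by
      rw [PySem.List.pyGetD_natCast]
      simp [List.getD_eq_getElem?_getD]
    have hcast : (s.length : Int) + 1 = ((s.length + 1 : Nat) : Int) := by omega
    have hgb : PySem.List.pyGetD (s ++ a :: b :: r) ((s.length : Int) + 1) "" = b := by
      rw [hcast, PySem.List.pyGetD_natCast]
      simp [List.getD_eq_getElem?_getD]
    rw [hga, hgb]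
    have hs2 : (s.length : Int) + 2 = (((s ++ [a, b]).length : Nat) : Int) := by
      simp
    have happ : s ++ a :: b :: r = (s ++ [a, b]) ++ r := by simp
    have hlen2 : (s.length : Int) + (r.length : Int) + 2 = ((((s ++ [a, b]) ++ r).length : Nat) : Int) := by
      simp; ring
    rw [hs2, happ, hlen2] at *
    rw [pvFoldPairs_gen r (s ++ [a, b]) (acc ++ [a ++ "\n" ++ b])]
    simp [pvPairsRec]

theorem pvFoldPairs (p : List String) :
    (PySem.List.pyRange 0 ((p.length : Nat) : Int) 2).foldl
      (fun pairs i =>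
        if i + 1 < ((p.length : Nat) : Int) then
          pairs ++ [PySem.List.pyGetD p i "" ++ "\n" ++ PySem.List.pyGetD p (i + 1) ""]
        else pairs) [] = pvPairsRec p := by
  have h := pvFoldPairs_gen p [] []
  simpa using h

theorem pvA_eq (text : String) :
    split_conversation text =
      pvPairsRec (pvSegments ((PySem.Str.split? text "\n").getD [])) := by
  unfold split_conversation
  show (PySem.List.pyRange 0
      (((pvFin (((PySem.Str.split? text "\n").getD []).foldl pvStepA ([], []))).length : Nat) : Int) 2).foldl
      (fun pairs i =>
        if i + 1 < (((pvFin (((PySem.Str.split? text "\n").getD []).foldl pvStepA ([], []))).length : Nat) : Int) then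
          pairs ++ [PySem.List.pyGetD (pvFin (((PySem.Str.split? text "\n").getD []).foldl pvStepA ([], []))) i "" ++ "\n" ++
            PySem.List.pyGetD (pvFin (((PySem.Str.split? text "\n").getD []).foldl pvStepA ([], []))) (i + 1) ""]
        else pairs) [] = _
  have h1 : pvFin (((PySem.Str.split? text "\n").getD []).foldl pvStepA ([], [])) =
      pvSegments ((PySem.Str.split? text "\n").getD []) := by
    rw [pvFoldA_eq_segsA _ [] []]
    simpa using pvSegsA_eq_segments ((PySem.Str.split? text "\n").getD []).length _ le_rfl
  rw [h1, pvFoldPairs]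

theorem pvB_eq (text : String) :
    split_conversation_alt text =
      pvPairsRec (pvSegments ((PySem.Str.split? text "\n").getD [])) := by
  unfold split_conversation_alt
  exact pvZip_eq_pairsRec _

-- ===== VERDICT (by name: the statement is the Claim_ definition above) =====
theorem split_conversation_spec : Claim_equal_split_conversation := by
  intro text _
  unfold Spec_split_conversation
  rw [pvA_eq text, pvB_eq text]
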